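-- pv_equiv track=rewrite | github.com/Libertynick/api-test | utils/order_split_helper.py | _get_active_groups
-- ===== SOURCE A (Python) =====
-- def _get_active_groups(line_types: list) -> set:
--     """
--     Определяет какие группы материалов активны в запросе.
--
--     Логика группировки:
--     - Группа 1: lineType = "Material"
--     - Группа 2: lineType = "HEXAdditions"
--     - Группа 3: lineType in ["TDU", "AutoShield", "BTP"]
--     - Группа 4: lineType in ["HEX", "Pump"]
--
--     :param line_types: Список значений lineType из orderLines.
--     :return: Множество номеров активных групп (от 1 до 4).
--
--     Example:
--         line_types = ["Material", "HEX", "TDU"]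
--         groups = OrderSplitHelper._get_active_groups(line_types)
--         # groups = {1, 3, 4}
--     """
--     groups = set()
--
--     if "Material" in line_types:
--         groups.add(1)
--
--     if "HEXAdditions" in line_types:
--         groups.add(2)
--
--     if any(lt in ["TDU", "AutoShield", "BTP"] for lt in line_types):
--         groups.add(3)
--
--     if any(lt in ["HEX", "Pump"] for lt in line_types):
--         groups.add(4)
--
--     return groups
-- ===== SOURCE B (Python) =====
-- _GROUP_OF = {
--     "Material": 1,
--     "HEXAdditions": 2,
--     "TDU": 3, "AutoShield": 3, "BTP": 3,
--     "HEX": 4, "Pump": 4,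
-- }
--
--
-- def _get_active_groups(line_types: list) -> set:
--     seen1 = seen2 = seen3 = seen4 = False
--     for lt in line_types:
--         g = _GROUP_OF.get(lt)
--         if g == 1:
--             seen1 = True
--         elif g == 2:
--             seen2 = True
--         elif g == 3:
--             seen3 = True
--         elif g == 4:
--             seen4 = True
--     return {g for g, s in ((1, seen1), (2, seen2), (3, seen3), (4, seen4)) if s}
-- ===== Notes on version B (the rewrite author's own statement) =====
-- stated objective: alternative
-- what changed: Replaces A's four separate scans/membership tests over line_types with a single pass that consults a prebuilt lineType-to-group dictionary and sets per-group flags, then assembles the group set from the flags.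
import Mathlib
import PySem

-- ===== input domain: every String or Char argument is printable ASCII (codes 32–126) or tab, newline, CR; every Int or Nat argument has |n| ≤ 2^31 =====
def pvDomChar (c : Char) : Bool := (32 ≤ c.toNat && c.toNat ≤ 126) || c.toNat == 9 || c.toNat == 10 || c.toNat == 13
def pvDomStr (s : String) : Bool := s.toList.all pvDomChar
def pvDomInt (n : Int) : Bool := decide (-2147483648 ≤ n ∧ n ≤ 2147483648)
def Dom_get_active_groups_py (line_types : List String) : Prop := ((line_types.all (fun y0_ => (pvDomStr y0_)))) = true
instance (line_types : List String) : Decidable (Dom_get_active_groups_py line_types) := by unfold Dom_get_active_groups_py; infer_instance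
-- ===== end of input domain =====

-- B replaces A's four separate scans of line_types with one pass over a lineType→group table; same cost class (alternative decomposition).


-- ===== PORT A =====
def get_active_groups_py (line_types : List String) : List Int :=
  let groups : PySem.Set Int := PySem.Set.empty
  let groups := if line_types.contains "Material" then PySem.Set.add groups 1 else groups
  let groups := if line_types.contains "HEXAdditions" then PySem.Set.add groups 2 else groups
  let groups := if line_types.any (fun lt => (["TDU", "AutoShield", "BTP"] : List String).contains lt)
                then PySem.Set.add groups 3 else groups
  let groups := if line_types.any (fun lt => (["HEX", "Pump"] : List String).contains lt)
                then PySem.Set.add groups 4 else groups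
  groups

-- ===== PORT B =====
-- module-level dict _GROUP_OF
def pvGroupTable : PySem.Dict String Int :=
  PySem.Dict.ofList [("Material", 1), ("HEXAdditions", 2), ("TDU", 3), ("AutoShield", 3), ("BTP", 3), ("HEX", 4), ("Pump", 4)]

-- the loop body of Source B: g = _GROUP_OF.get(lt); if g == 1: … elif … (g==i compared on Option Int)
def pvStep (f : Bool × Bool × Bool × Bool) (lt : String) : Bool × Bool × Bool × Bool :=
  let g := PySem.Dict.get? pvGroupTable lt
  if g == some 1 then (true, f.2.1, f.2.2.1, f.2.2.2)
  else if g == some 2 then (f.1, true, f.2.2.1, f.2.2.2)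
  else if g == some 3 then (f.1, f.2.1, true, f.2.2.2)
  else if g == some 4 then (f.1, f.2.1, f.2.2.1, true)
  else f

def get_active_groups_py_alt (line_types : List String) : List Int :=
  let f := line_types.foldl pvStep (false, false, false, false)
  PySem.Set.ofList
    (((([((1 : Int), f.1), (2, f.2.1), (3, f.2.2.1), (4, f.2.2.2)]).filter (fun p => p.2)).map (fun p => p.1)))

-- ===== PRECONDITION & SPEC =====
def Spec_get_active_groups_py (line_types : List String) (out : List Int) : Prop := out = get_active_groups_py_alt line_types
instance (line_types : List String) (out : List Int) : Decidable (Spec_get_active_groups_py line_types out) := by unfold Spec_get_active_groups_py; infer_instance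

-- ===== CLAIM (what is proved, stated in full; the proofs are below) =====
def Claim_equal_get_active_groups_py : Prop := ∀ (line_types : List String), Dom_get_active_groups_py line_types → Spec_get_active_groups_py line_types (get_active_groups_py line_types)

-- ===== LEMMAS AND PROOFS =====

theorem pvTbl : pvGroupTable = PySem.Dict.mk [("Material", 1), ("HEXAdditions", 2), ("TDU", 3), ("AutoShield", 3), ("BTP", 3), ("HEX", 4), ("Pump", 4)] := by decide

theorem pvG1 (s : String) : (PySem.Dict.get? pvGroupTable s == some 1) = (s == "Material") := by
  rw [pvTbl]
  by_cases h : ("Material":String) = s <;> by_cases h2 : ("HEXAdditions":String) = s <;> by_cases h3 : ("TDU":String) = s <;> by_cases h4 : ("AutoShield":String) = s <;> by_cases h5 : ("BTP":String) = s <;> by_cases h6 : ("HEX":String) = s <;> by_cases h7 : ("Pump":String) = s <;> simp_all [PySem.Dict.get?] <;> simp_all [eq_comm]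

theorem pvG2 (s : String) : (PySem.Dict.get? pvGroupTable s == some 2) = (s == "HEXAdditions") := by
  rw [pvTbl]
  by_cases h : ("Material":String) = s <;> by_cases h2 : ("HEXAdditions":String) = s <;> by_cases h3 : ("TDU":String) = s <;> by_cases h4 : ("AutoShield":String) = s <;> by_cases h5 : ("BTP":String) = s <;> by_cases h6 : ("HEX":String) = s <;> by_cases h7 : ("Pump":String) = s <;> simp_all [PySem.Dict.get?] <;> simp_all [eq_comm]

theorem pvG3 (s : String) : (PySem.Dict.get? pvGroupTable s == some 3) = ((["TDU", "AutoShield", "BTP"] : List String).contains s) := by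
  rw [pvTbl]
  by_cases h : ("Material":String) = s <;> by_cases h2 : ("HEXAdditions":String) = s <;> by_cases h3 : ("TDU":String) = s <;> by_cases h4 : ("AutoShield":String) = s <;> by_cases h5 : ("BTP":String) = s <;> by_cases h6 : ("HEX":String) = s <;> by_cases h7 : ("Pump":String) = s <;> simp_all [PySem.Dict.get?] <;> simp_all [eq_comm]

theorem pvG4 (s : String) : (PySem.Dict.get? pvGroupTable s == some 4) = ((["HEX", "Pump"] : List String).contains s) := by
  rw [pvTbl]
  by_cases h : ("Material":String) = s <;> by_cases h2 : ("HEXAdditions":String) = s <;> by_cases h3 : ("TDU":String) = s <;> by_cases h4 : ("AutoShield":String) = s <;> by_cases h5 : ("BTP":String) = s <;> by_cases h6 : ("HEX":String) = s <;> by_cases h7 : ("Pump":String) = s <;> simp_all [PySem.Dict.get?] <;> simp_all [eq_comm]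

-- one loop-body step merges the element's group flag into the accumulator
theorem pvStepEq (a b c d : Bool) (x : String) :
    pvStep (a, b, c, d) x =
      (a || (PySem.Dict.get? pvGroupTable x == some 1),
       b || (PySem.Dict.get? pvGroupTable x == some 2),
       c || (PySem.Dict.get? pvGroupTable x == some 3),
       d || (PySem.Dict.get? pvGroupTable x == some 4)) := by
  unfold pvStep
  by_cases h1 : PySem.Dict.get? pvGroupTable x = some 1 <;>
    by_cases h2 : PySem.Dict.get? pvGroupTable x = some 2 <;>
      by_cases h3 : PySem.Dict.get? pvGroupTable x = some 3 <;>
        by_cases h4 : PySem.Dict.get? pvGroupTable x = some 4 <;>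
          simp_all

-- the one-pass fold computes exactly the four membership flags
theorem pvFold (l : List String) (a b c d : Bool) :
    l.foldl pvStep (a, b, c, d) =
      (a || l.any (fun s => PySem.Dict.get? pvGroupTable s == some 1),
       b || l.any (fun s => PySem.Dict.get? pvGroupTable s == some 2),
       c || l.any (fun s => PySem.Dict.get? pvGroupTable s == some 3),
       d || l.any (fun s => PySem.Dict.get? pvGroupTable s == some 4)) := by
  induction l generalizing a b c d with
  | nil => simp
  | cons x xs ih =>
    simp only [List.foldl_cons, List.any_cons]
    rw [pvStepEq, ih]
    simp [Bool.or_assoc]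

-- any (· == s0) is contains s0
theorem pvAnyBeq (l : List String) (s0 : String) : (l.any fun s => s == s0) = l.contains s0 := by
  induction l with
  | nil => rfl
  | cons x xs ih =>
    have hb : (x == s0) = decide (s0 = x) := by
      by_cases hx : x = s0
      · simp [hx]
      · simp [hx, Ne.symm hx]
    simp [List.any_cons, ih, hb]

theorem pvMain (l : List String) : get_active_groups_py l = get_active_groups_py_alt l := by
  simp only [get_active_groups_py, get_active_groups_py_alt]
  rw [pvFold]
  simp only [Bool.false_or, pvG1, pvG2, pvG3, pvG4, pvAnyBeq]
  cases l.contains "Material" <;> cases l.contains "HEXAdditions" <;>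
    cases l.any (fun lt => (["TDU", "AutoShield", "BTP"] : List String).contains lt) <;>
      cases l.any (fun lt => (["HEX", "Pump"] : List String).contains lt) <;> rfl

-- ===== VERDICT (by name: the statement is the Claim_ definition above) =====
theorem get_active_groups_py_spec : Claim_equal_get_active_groups_py := by
  intro l _
  exact pvMain l
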